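-- pv_equiv track=rewrite | github.com/huxiaoheng44/lightweight-ml-artifact-store-viewer | LoggerAndViewer/visualization/backend.py | groupArtifactsBy
-- ===== SOURCE A (Python) =====
-- def groupArtifactsBy(field, artifacts):
--     grouped_artifacts = {}
--
--     for artifact in artifacts:
--         key = artifact.get(field)
--         if key not in grouped_artifacts:
--             grouped_artifacts[key] = []
--         grouped_artifacts[key].append(artifact)
--
--     return list(grouped_artifacts.values())
-- ===== SOURCE B (Python) =====
-- def groupArtifactsBy(field, artifacts):
--     seen = set()
--     keys = []
--     for artifact in artifacts:
--         key = artifact.get(field)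
--         if key not in seen:
--             seen.add(key)
--             keys.append(key)
--     return [[a for a in artifacts if a.get(field) == key] for key in keys]
-- ===== Notes on version B (the rewrite author's own statement) =====
-- stated objective: alternative
-- what changed: replaces the single accumulate-into-dict pass with a dedupe pass collecting distinct keys in first-occurrence order followed by one filtered scan of the list per key
import Mathlib
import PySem

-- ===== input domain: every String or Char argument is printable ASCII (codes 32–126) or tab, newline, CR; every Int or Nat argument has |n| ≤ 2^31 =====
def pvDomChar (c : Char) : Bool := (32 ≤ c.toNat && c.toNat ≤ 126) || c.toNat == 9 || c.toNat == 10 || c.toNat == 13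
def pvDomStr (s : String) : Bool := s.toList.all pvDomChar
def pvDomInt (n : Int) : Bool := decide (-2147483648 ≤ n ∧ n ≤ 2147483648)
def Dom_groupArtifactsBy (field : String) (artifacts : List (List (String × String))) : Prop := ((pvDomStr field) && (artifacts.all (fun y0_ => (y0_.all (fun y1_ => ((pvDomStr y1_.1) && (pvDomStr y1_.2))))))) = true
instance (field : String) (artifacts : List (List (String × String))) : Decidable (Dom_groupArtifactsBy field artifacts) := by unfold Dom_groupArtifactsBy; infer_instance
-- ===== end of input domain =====

-- B replaces A's single accumulate-into-an-ordered-dict pass by a dedupe pass over the keys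
-- followed by one filtered scan of the artifact list per distinct key (alternative decomposition,
-- same return value; not claimed faster).

-- ===== PORT A =====
-- A: one pass accumulating artifacts into a dict keyed by artifact.get(field), then list(values()).
def groupArtifactsBy (field : String) (artifacts : List (List (String × String))) : List (List (List (String × String))) :=
  (artifacts.foldl
    (fun grouped artifact =>
      let key := (PySem.Dict.mk artifact).get? field
      let grouped := if grouped.contains key then grouped else grouped.insert key []
      grouped.modify key [] (fun l => l ++ [artifact]))
    PySem.Dict.empty).values

-- ===== PORT B =====
-- B: collect the distinct keys in first-occurrence order (seen-set), then filter once per key.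
def groupArtifactsBy_alt (field : String) (artifacts : List (List (String × String))) : List (List (List (String × String))) :=
  let keys := artifacts.foldl
    (fun keys artifact => PySem.Set.add keys ((PySem.Dict.mk artifact).get? field))
    PySem.Set.empty
  keys.map (fun key => artifacts.filter (fun a => (PySem.Dict.mk a).get? field == key))

-- ===== PRECONDITION & SPEC =====
def Spec_groupArtifactsBy (field : String) (artifacts : List (List (String × String))) (out : List (List (List (String × String)))) : Prop := out = groupArtifactsBy_alt field artifacts
instance (field : String) (artifacts : List (List (String × String))) (out : List (List (List (String × String)))) : Decidable (Spec_groupArtifactsBy field artifacts out) := by unfold Spec_groupArtifactsBy; infer_instance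

-- ===== CLAIM (what is proved, stated in full; the proofs are below) =====
def Claim_equal_groupArtifactsBy : Prop := ∀ (field : String) (artifacts : List (List (String × String))), Dom_groupArtifactsBy field artifacts → Spec_groupArtifactsBy field artifacts (groupArtifactsBy field artifacts)

-- ===== LEMMAS AND PROOFS =====

-- A's "insert-empty-if-absent then append" step is the same dict as a plain modify-with-default-[].
theorem pvStepA_eq {κ ν : Type} [BEq κ] [LawfulBEq κ] (d : PySem.Dict κ ν) (k : κ) (f : ν → ν) (d0 : ν) :
    (if d.contains k then d else d.insert k d0).modify k d0 f = d.modify k d0 f := by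
  by_cases h : d.contains k = true
  · simp [h]
  · rw [Bool.not_eq_true] at h
    simp only [h, Bool.false_eq_true, if_false]
    simp only [PySem.Dict.modify, PySem.Dict.getD_insert_self,
      PySem.Dict.getD_of_not_contains d d0 h, PySem.Dict.insert_insert_self]

theorem groupArtifactsBy_eq_alt (field : String) (artifacts : List (List (String × String))) :
    groupArtifactsBy field artifacts = groupArtifactsBy_alt field artifacts := by
  unfold groupArtifactsBy groupArtifactsBy_alt
  set key : List (String × String) → Option String := fun a => (PySem.Dict.mk a).get? field with hkey
  -- A's fold is the plain modify-append fold
  have hfoldA : artifacts.foldl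
      (fun grouped artifact =>
        let k := key artifact
        let grouped := if grouped.contains k then grouped else grouped.insert k []
        grouped.modify k [] (fun l => l ++ [artifact]))
      PySem.Dict.empty
      = artifacts.foldl (fun d a => d.modify (key a) [] (fun l => l ++ [a])) PySem.Dict.empty := by
    congr 1
    funext d a
    exact pvStepA_eq d (key a) (fun l => l ++ [a]) []
  simp only []
  rw [hfoldA]
  set D := artifacts.foldl (fun d a => d.modify (key a) [] (fun l => l ++ [a])) PySem.Dict.empty with hD
  have hnodup : D.keys.Nodup := by
    rw [hD]
    exact PySem.Dict.nodup_keys_foldl_modify_key artifacts key []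
      (fun d a => fun l => l ++ [a]) PySem.Dict.empty (by simp)
  -- keys of A's dict = distinct keys in first-occurrence order = B's keys list
  have hkeys : D.keys = PySem.Set.ofList (artifacts.map key) := by
    rw [hD, PySem.Dict.keys_foldl_modify_key]
    simp [PySem.Dict.keys_empty, PySem.Set.update_nil_left]
  have hBkeys : artifacts.foldl (fun s a => PySem.Set.add s (key a)) PySem.Set.empty
      = PySem.Set.ofList (artifacts.map key) := by
    rw [← PySem.Set.update_map_eq_foldl_add]
    simp [PySem.Set.update_nil_left, PySem.Set.empty]
  -- each group = the filter of the artifacts list by its key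
  have hgetD : ∀ c, D.getD c [] = artifacts.filter (fun a => key a == c) := by
    intro c
    have hfm : artifacts.foldl (fun d a => d.modify (key a) [] (fun l => l ++ [a])) PySem.Dict.empty
        = (artifacts.map (fun a => (key a, a))).foldl
            (fun (d : PySem.Dict (Option String) (List (List (String × String)))) p =>
              d.modify p.1 [] (fun l => l ++ [p.2])) PySem.Dict.empty := by
      simp [List.foldl_map]
    rw [hD, hfm, PySem.Dict.getD_foldl_modify_append]
    simp [PySem.Dict.getD_empty, List.filter_map, Function.comp_def, List.map_map]
  rw [PySem.Dict.values_eq_map_keys D hnodup [], hkeys, hBkeys]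
  apply List.map_congr_left
  intro c _
  exact hgetD c

-- ===== VERDICT (by name: the statement is the Claim_ definition above) =====
theorem groupArtifactsBy_spec : Claim_equal_groupArtifactsBy := by
  intro field artifacts _
  unfold Spec_groupArtifactsBy
  exact groupArtifactsBy_eq_alt field artifacts
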